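-- pv_equiv track=rewrite | github.com/cxyfer/OJ | Leetcode/python3/medium/2311_Longest Binary Subsequence Less Than or Equal to K.py | longestSubsequence
-- ===== SOURCE A (Python) =====
-- def longestSubsequence(s: str, k: int) -> int:
--     ans = len(s)
--     for i, b in enumerate(reversed(s)):
--         if b == '1':
--             if (v := 1 << i) > k:
--                 ans -= s[:-i].count('1')  # 前面的所有 1 都不能保留了
--                 break
--             k -= v
--     return ans
-- ===== SOURCE B (Python) =====
-- def longestSubsequence(s: str, k: int) -> int:
--     # Stage 1: extract the bit weights of the '1' characters, least significant first.
--     powers = [1 << i for i, b in enumerate(reversed(s)) if b == '1']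
--     # Stage 2: running prefix sums of those weights.
--     prefix = []
--     run = 0
--     for p in powers:
--         run += p
--         prefix.append(run)
--     # Stage 3: since prefix is strictly increasing, the number of prefix sums <= k
--     # is exactly how many low-order ones can be kept; all other characters are kept.
--     ones = sum(1 for v in prefix if v <= k)
--     return (len(s) - len(powers)) + ones
-- ===== Notes on version B (the rewrite author's own statement) =====
-- stated objective: alternative
-- what changed: B replaces A's single break-early character scan (start at len(s), subtract a slice's '1'-count on break) by three staged passes with no early exit: extract the bit weights of the '1' characters into a list, build its prefix sums, and count how many prefix sums are <= k; this also removes A's s[:-0] empty-slice bug.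
-- intended difference: When the last character of s is '1' and k <= 0, A's break at i=0 subtracts count('1') of the empty slice s[:-0] and returns len(s), while B returns the number of non-'1' characters, which is the longest subsequence with value <= k. — e.g. on longestSubsequence("1", 0): A returns 1, B returns 0
import Mathlib
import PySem

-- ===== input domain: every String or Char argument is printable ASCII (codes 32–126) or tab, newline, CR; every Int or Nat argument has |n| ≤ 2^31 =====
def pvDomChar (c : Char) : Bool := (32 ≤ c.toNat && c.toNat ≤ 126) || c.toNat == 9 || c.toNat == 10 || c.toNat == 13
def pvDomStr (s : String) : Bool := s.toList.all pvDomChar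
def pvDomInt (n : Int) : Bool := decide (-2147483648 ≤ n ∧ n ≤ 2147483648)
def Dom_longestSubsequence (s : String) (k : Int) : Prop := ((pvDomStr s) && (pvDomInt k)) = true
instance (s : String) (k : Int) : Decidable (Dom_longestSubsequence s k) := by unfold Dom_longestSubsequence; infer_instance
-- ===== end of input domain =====

-- B is three staged passes with no early exit (extract bit weights, prefix sums, count ≤ k);
-- it differs from A only on the s[:-0] corner stated at D_ below.

-- ===== PORT A =====
-- 'for i, b in enumerate(reversed(s))' as a recursion over the reversed char list carrying the
-- index i; '1 << i' is 2 ^ i.toNat (exact: i ≥ 0 here); break returns 'ans - s[:-i].count("1")'.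
def longestSubsequenceGoA (s : List Char) (cs : List Char) (i : Int) (ans k : Int) : Int :=
  match cs with
  | [] => ans
  | b :: rest =>
    if b == '1' then
      if (2 ^ i.toNat : Int) > k then
        ans - ((PySem.List.slice s none (some (-i))).count '1' : Int)
      else
        longestSubsequenceGoA s rest (i + 1) ans (k - 2 ^ i.toNat)
    else
      longestSubsequenceGoA s rest (i + 1) ans k

def longestSubsequence (s : String) (k : Int) : Int :=
  longestSubsequenceGoA s.toList s.toList.reverse 0 (s.toList.length : Int) k

-- ===== PORT B =====
-- Stage 1 of Source B: the list comprehension over enumerate(reversed(s)) keeping 1 << i at the '1's.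
def pvPowersB (cs : List Char) (n : Nat) : List Int :=
  match cs with
  | [] => []
  | b :: rest => if b == '1' then (2 ^ n : Int) :: pvPowersB rest (n + 1) else pvPowersB rest (n + 1)

-- Stage 2 of Source B: the prefix-sum loop (run accumulator, appended each step).
def pvPrefixB (ps : List Int) (run : Int) : List Int :=
  match ps with
  | [] => []
  | p :: rest => (run + p) :: pvPrefixB rest (run + p)

-- Stage 3 of Source B: 'sum(1 for v in prefix if v <= k)' is the count of elements ≤ k.
def longestSubsequence_alt (s : String) (k : Int) : Int :=
  let powers := pvPowersB s.toList.reverse 0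
  let pref := pvPrefixB powers 0
  ((s.toList.length : Int) - (powers.length : Int)) + (pref.countP (fun v => decide (v ≤ k)) : Int)

-- ===== PRECONDITION & SPEC =====
-- When the last character of s is '1' and k ≤ 0, A's break at i=0 subtracts count('1') of the
-- empty slice s[:-0] and returns len(s), while B returns the number of non-'1' characters,
-- which is the longest subsequence with value ≤ k.
def D_longestSubsequence (s : String) (k : Int) : Prop :=
  k ≤ 0 ∧ s.toList.getLast? = some '1'
instance (s : String) (k : Int) : Decidable (D_longestSubsequence s k) := by
  unfold D_longestSubsequence; infer_instance

def Spec_longestSubsequence (s : String) (k : Int) (out : Int) : Prop :=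
  ¬ D_longestSubsequence s k → out = longestSubsequence_alt s k
instance (s : String) (k : Int) (out : Int) : Decidable (Spec_longestSubsequence s k out) := by
  unfold Spec_longestSubsequence; infer_instance

def pvDiffWitness_longestSubsequence : String × Int := ("1", 0)
def pvDiffWitnessOut_longestSubsequence : Int × Int := (1, 0)

-- ===== CLAIM (what is proved, stated in full; the proofs are below) =====
def Claim_unchanged_longestSubsequence : Prop :=
  ∀ (s : String) (k : Int), Dom_longestSubsequence s k →
    Spec_longestSubsequence s k (longestSubsequence s k)
def Claim_changed_longestSubsequence : Prop :=
  Dom_longestSubsequence (pvDiffWitness_longestSubsequence.1) (pvDiffWitness_longestSubsequence.2) ∧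
  D_longestSubsequence (pvDiffWitness_longestSubsequence.1) (pvDiffWitness_longestSubsequence.2) ∧
  longestSubsequence (pvDiffWitness_longestSubsequence.1) (pvDiffWitness_longestSubsequence.2) = pvDiffWitnessOut_longestSubsequence.1 ∧
  longestSubsequence_alt (pvDiffWitness_longestSubsequence.1) (pvDiffWitness_longestSubsequence.2) = pvDiffWitnessOut_longestSubsequence.2 ∧
  pvDiffWitnessOut_longestSubsequence.1 ≠ pvDiffWitnessOut_longestSubsequence.2
def Claim_exact_longestSubsequence : Prop :=
  ∀ (s : String) (k : Int), Dom_longestSubsequence s k → D_longestSubsequence s k →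
    longestSubsequence s k ≠ longestSubsequence_alt s k

-- ===== LEMMAS AND PROOFS =====

-- Every extracted bit weight is positive.
lemma pvPowersB_pos (cs : List Char) : ∀ (n : Nat) (p : Int), p ∈ pvPowersB cs n → 0 < p := by
  induction cs with
  | nil => intro n p hp; simp [pvPowersB] at hp
  | cons b rest ih =>
    intro n p hp
    by_cases hb : (b == '1') = true
    · rw [pvPowersB, if_pos hb] at hp
      rcases List.mem_cons.mp hp with h | h
      · subst h; positivity
      · exact ih (n + 1) p h
    · rw [pvPowersB, if_neg hb] at hp
      exact ih (n + 1) p hp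

-- Once the running sum exceeds k, no later prefix sum is ≤ k (the weights are positive).
lemma prefix_count_zero (ps : List Int) : ∀ (run k : Int), k < run →
    (∀ p ∈ ps, 0 < p) →
    (pvPrefixB ps run).countP (fun v => decide (v ≤ k)) = 0 := by
  induction ps with
  | nil => intro run k _ _; simp [pvPrefixB]
  | cons p rest ih =>
    intro run k hk hpos
    have hp : 0 < p := hpos p (List.mem_cons_self)
    rw [pvPrefixB, List.countP_cons, if_neg (by simp; omega),
      ih (run + p) k (by omega) (fun q hq => hpos q (List.mem_cons_of_mem _ hq))]

-- Main loop invariant: on the suffix cs = (reverse s).drop n with budget k - total, A's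
-- break-scan equals ans minus cs's '1'-count plus B's count of prefix sums ≤ k from total.
lemma loop_eq (s : List Char) (k : Int) (cs : List Char) :
    ∀ (n : Nat) (ansA total : Int),
      cs = s.reverse.drop n →
      (1 ≤ n ∨ 0 < k - total ∨ cs.head? ≠ some '1') →
      longestSubsequenceGoA s cs (n : Int) ansA (k - total)
        = ansA - (cs.count '1' : Int)
          + ((pvPrefixB (pvPowersB cs n) total).countP (fun v => decide (v ≤ k)) : Int) := by
  induction cs with
  | nil => intro n ansA total _ _; simp [longestSubsequenceGoA, pvPowersB, pvPrefixB]
  | cons b rest ih =>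
    intro n ansA total hcs hside
    have hrest : rest = s.reverse.drop (n + 1) := by
      have := congrArg List.tail hcs
      simpa [List.tail_drop] using this
    have hcast : ((n : Int) + 1) = ((n + 1 : Nat) : Int) := by push_cast; ring
    have hp : (0:Int) < 2 ^ n := by positivity
    simp only [longestSubsequenceGoA, Int.toNat_natCast]
    by_cases hbq : (b == '1') = true
    · have hb : b = '1' := by simpa using hbq
      rw [if_pos hbq]
      by_cases hbig : (2 ^ n : Int) > k - total
      · -- A breaks; B's remaining prefix sums are all > k so its count is 0
        have hn1 : 1 ≤ n := by
          rcases hside with h | h | h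
          · exact h
          · by_contra hc
            have hn0 : n = 0 := by omega
            subst hn0
            simp only [pow_zero] at hbig
            omega
          · rw [List.head?_cons, hb] at h
            exact absurd rfl h
        rw [if_pos hbig]
        have hslice : PySem.List.slice s none (some (-(n : Int)))
            = s.take (s.length - n) := PySem.List.slice_to_neg_natCast s n (by omega)
        have htake : s.take (s.length - n) = (s.reverse.drop n).reverse := by
          rw [List.reverse_drop, List.reverse_reverse, List.length_reverse]
        have hA : (PySem.List.slice s none (some (-(n : Int)))).count '1'
            = (b :: rest).count '1' := by
          rw [hslice, htake, ← hcs, List.count_reverse]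
        rw [hA, pvPowersB, if_pos hbq, pvPrefixB, List.countP_cons,
          if_neg (by simp; omega),
          prefix_count_zero _ (total + 2 ^ n) k (by omega)
            (fun q hq => pvPowersB_pos rest (n + 1) q hq)]
        simp
      · -- A keeps this '1'; B's first prefix sum is ≤ k and counts 1
        rw [if_neg hbig,
          show k - total - 2 ^ n = k - (total + 2 ^ n) by ring, hcast,
          ih (n + 1) ansA (total + 2 ^ n) hrest (Or.inl (by omega)),
          pvPowersB, if_pos hbq, pvPrefixB, List.countP_cons,
          if_pos (by simp; omega), List.count_cons, if_pos hbq]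
        push_cast
        ring
    · -- non-'1' character: A keeps it and B extracts no weight for it
      rw [if_neg hbq, hcast,
        ih (n + 1) ansA total hrest (Or.inl (by omega)),
        pvPowersB, if_neg hbq, List.count_cons, if_neg hbq]
      simp

-- The powers list is as long as the '1'-count of its source.
lemma pvPowersB_length (cs : List Char) : ∀ n, (pvPowersB cs n).length = cs.count '1' := by
  induction cs with
  | nil => intro n; simp [pvPowersB]
  | cons b rest ih =>
    intro n
    by_cases hb : (b == '1') = true
    · rw [pvPowersB, if_pos hb, List.length_cons, ih (n + 1), List.count_cons, if_pos hb]
    · rw [pvPowersB, if_neg hb, ih (n + 1), List.count_cons, if_neg hb]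
      simp

-- ===== VERDICT (by name: the statement is the Claim_ definition above) =====
theorem longestSubsequence_spec : Claim_unchanged_longestSubsequence := by
  intro s k _ hD'
  unfold longestSubsequence longestSubsequence_alt
  have hside : (1 ≤ 0 ∨ 0 < k - 0 ∨ (s.toList.reverse).head? ≠ some '1') := by
    unfold D_longestSubsequence at hD'
    by_cases hk : 0 < k
    · exact Or.inr (Or.inl (by omega))
    · refine Or.inr (Or.inr ?_)
      rw [List.head?_reverse]
      intro hlast
      exact hD' ⟨by omega, hlast⟩
  have h := loop_eq s.toList k s.toList.reverse 0 (s.toList.length : Int) 0 (by simp) hside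
  simp only [Nat.cast_zero, sub_zero] at h
  rw [h]
  simp [pvPowersB_length, List.count_reverse]

theorem longestSubsequence_changed : Claim_changed_longestSubsequence := by
  unfold Claim_changed_longestSubsequence; decide

theorem longestSubsequence_tight : Claim_exact_longestSubsequence := by
  intro s k _ hD
  obtain ⟨hk, hlast⟩ := hD
  unfold longestSubsequence longestSubsequence_alt
  rw [← List.head?_reverse] at hlast
  obtain ⟨rest, hr⟩ : ∃ rest, s.toList.reverse = '1' :: rest := by
    rcases h : s.toList.reverse with _ | ⟨b, rest⟩
    · rw [h] at hlast; simp at hlast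
    · have hb : b = '1' := by rw [h] at hlast; simpa using hlast
      exact ⟨rest, by rw [hb]⟩
  rw [hr]
  -- A breaks immediately: s[:-0] is the empty slice, so A returns len(s)
  simp only [longestSubsequenceGoA]
  rw [if_pos (show (('1' : Char) == '1') = true from rfl),
    if_pos (show (2 ^ ((0 : Int)).toNat : Int) > k by simp only [Int.toNat_zero, pow_zero]; omega)]
  have hslice0 : PySem.List.slice s.toList none (some (-(0 : Int))) = [] := by
    rw [show (-(0 : Int)) = (0 : Int) from by ring,
      PySem.List.slice_to (xs := s.toList) (b := (0 : Int)) (by omega)]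
    simp
  rw [hslice0]
  -- B counts no prefix sum (all are ≥ 1 > k) and so returns len(s) minus the '1'-count
  have hzero : (pvPrefixB (pvPowersB ('1' :: rest) 0) 0).countP (fun v => decide (v ≤ k)) = 0 := by
    rw [pvPowersB, if_pos (show (('1' : Char) == '1') = true from rfl), pvPrefixB, List.countP_cons, if_neg (by simp; omega),
      prefix_count_zero _ (0 + 2 ^ 0) k (by omega) (fun q hq => pvPowersB_pos rest 1 q hq)]
  rw [hzero, pvPowersB_length ('1' :: rest) 0]
  have hlen : s.toList.length = rest.length + 1 := by
    have := congrArg List.length hr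
    simpa using this
  have hcount : ('1' :: rest).count '1' = rest.count '1' + 1 := List.count_cons_self
  have hle : rest.count '1' ≤ rest.length := List.count_le_length
  simp only [List.count_nil, Nat.cast_zero]
  push_cast [hlen, hcount]
  omega
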